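-- pv_equiv track=rewrite | github.com/alexandraback/datacollection | solutions_5744014401732608_0/Python/naruaway/main.py | solve
-- ===== SOURCE A (Python) =====
-- def solve(B, M):
--     p = 1
--     i = 0
--     while True:
--         if i + 2 > B:
--             return ('IMPOSSIBLE', None, None)
--         if p >= M:
--             break
--         p *= 2
--         i += 1
--     r = p - M
--     j = 0
--     cut_indicies = []
--     while r != 0:
--         if r & 1 == 1:
--             cut_indicies.append(B - 2 - j)
--         r >>= 1
--         j += 1
--     return ('POSSIBLE', cut_indicies, B - 2 - i)
-- ===== SOURCE B (Python) =====
-- def solve(B, M):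
--     # closed-form: smallest i with 2**i >= M
--     i = (M - 1).bit_length() if M > 1 else 0
--     if i + 2 > B:
--         return ('IMPOSSIBLE', None, None)
--     r = (1 << i) - M
--     cut_indicies = [B - 2 - j for j in range(r.bit_length()) if (r >> j) & 1]
--     return ('POSSIBLE', cut_indicies, B - 2 - i)
-- ===== Notes on version B (the rewrite author's own statement) =====
-- stated objective: idiomatic
-- what changed: A's doubling loop that searches for the least power of two >= M is replaced by a closed-form bit_length computation, and the bit-extraction while-loop by a range comprehension over the set bits of the remainder.
import Mathlib
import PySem

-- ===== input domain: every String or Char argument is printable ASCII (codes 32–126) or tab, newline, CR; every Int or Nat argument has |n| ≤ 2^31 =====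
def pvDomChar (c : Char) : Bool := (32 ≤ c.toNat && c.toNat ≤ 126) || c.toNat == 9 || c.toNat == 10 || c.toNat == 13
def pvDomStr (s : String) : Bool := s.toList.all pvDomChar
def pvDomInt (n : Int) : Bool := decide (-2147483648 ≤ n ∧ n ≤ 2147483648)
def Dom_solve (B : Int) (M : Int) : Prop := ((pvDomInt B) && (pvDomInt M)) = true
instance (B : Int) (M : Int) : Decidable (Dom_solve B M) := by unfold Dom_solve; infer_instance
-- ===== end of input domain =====

-- B replaces A's doubling search for the least power of two ≥ M by closed-form bit arithmetic
-- (bit_length) and a range comprehension over the set bits of the remainder (objective: idiomatic).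

-- ===== PORT A =====
-- A's 'while True' loop: returns none at the IMPOSSIBLE early return, some (p, i) at the break.
def solveLoopA (B : Int) (M : Int) (p : Int) (i : Int) : Option (Int × Int) :=
  if i + 2 > B then none
  else if p ≥ M then some (p, i)
  else solveLoopA B M (p * 2) (i + 1)
termination_by (B - 1 - i).toNat
decreasing_by omega

-- A's second loop: Python 'while r != 0'; every call here has r ≥ 0, so the 'r ≤ 0' guard
-- (needed for totality in Lean) coincides with 'r == 0'. 'r & 1' is ported as floor-mod 2
-- (equal in Python for every int); 'r >>= 1' is '>>> 1' (Int shift, floors like Python).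
def bitsLoopA (B : Int) (r : Int) (j : Int) (acc : List Int) : List Int :=
  if r ≤ 0 then acc
  else bitsLoopA B (r >>> (1 : Nat)) (j + 1)
        (if PySem.Int.mod r 2 == 1 then acc ++ [B - 2 - j] else acc)
termination_by r.toNat
decreasing_by simp only [Int.shiftRight_eq_div_pow] at *; omega

def solve (B : Int) (M : Int) : String × Option (List Int) × Option Int :=
  match solveLoopA B M 1 0 with
  | none => ("IMPOSSIBLE", none, none)
  | some (p, i) => ("POSSIBLE", some (bitsLoopA B (p - M) 0 []), some (B - 2 - i))

-- ===== PORT B =====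
-- Python int.bit_length(): the number of bits of |n|.
def pyBitLength (n : Int) : Int := (Nat.size n.natAbs : Int)

def solve_alt (B : Int) (M : Int) : String × Option (List Int) × Option Int :=
  let i : Int := if M > 1 then pyBitLength (M - 1) else 0
  if i + 2 > B then ("IMPOSSIBLE", none, none)
  else
    let r : Int := 2 ^ i.toNat - M     -- 1 << i  (i ≥ 0 here)
    -- here r ≥ 0 (2^i ≥ M by choice of i), so '(r >> t) & 1' is computed on r.toNat; exact on that domain
    let cuts : List Int :=
      ((PySem.List.pyRange 0 (pyBitLength r) 1).filter
        (fun t => (r.toNat >>> t.toNat) % 2 == 1)).map (fun t => B - 2 - t)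
    ("POSSIBLE", some cuts, some (B - 2 - i))

-- ===== PRECONDITION & SPEC =====
def Spec_solve (B : Int) (M : Int) (out : String × Option (List Int) × Option Int) : Prop := out = solve_alt B M
instance (B : Int) (M : Int) (out : String × Option (List Int) × Option Int) : Decidable (Spec_solve B M out) := by unfold Spec_solve; infer_instance

-- ===== CLAIM (what is proved, stated in full; the proofs are below) =====
def Claim_equal_solve : Prop := ∀ (B : Int) (M : Int), Dom_solve B M → Spec_solve B M (solve B M)

-- ===== LEMMAS AND PROOFS =====

-- Nat.size unfolds one binary digit at a time.
lemma size_succ_div (n : Nat) (h : n ≠ 0) : Nat.size n = Nat.size (n / 2) + 1 := by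
  conv_lhs => rw [← Nat.bit_decide_mod_two_eq_one_shiftRight_one n]
  rw [Nat.size_bit (by rw [Nat.bit_decide_mod_two_eq_one_shiftRight_one]; exact h)]
  simp [Nat.shiftRight_one]

-- reference shape for the list of cut indices of a nonnegative remainder n, low bit first
def bitsSpec (B : Int) (j : Int) (n : Nat) : List Int :=
  if n = 0 then [] else (if n % 2 = 1 then [B - 2 - j] else []) ++ bitsSpec B (j + 1) (n / 2)
termination_by n
decreasing_by omega

lemma bitsLoopA_eq_spec (B : Int) : ∀ (n : Nat) (j : Int) (acc : List Int),
    bitsLoopA B (n : Int) j acc = acc ++ bitsSpec B j n := by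
  intro n
  induction n using Nat.strong_induction_on with
  | _ n ih =>
    intro j acc
    rw [bitsLoopA, bitsSpec]
    by_cases h0 : n = 0
    · subst h0; simp
    · have hmod : PySem.Int.mod (n : Int) 2 = ((n % 2 : Nat) : Int) := by
        simp only [PySem.Int.mod, Int.fmod_eq_emod]; omega
      have hsh : ((n : Int) >>> (1 : Nat)) = ((n / 2 : Nat) : Int) := by
        simp [Int.shiftRight_eq_div_pow]
      rw [if_neg (by omega : ¬ (n : Int) ≤ 0), if_neg h0, hsh, hmod,
        ih (n / 2) (by omega) (j + 1)]
      rcases Nat.mod_two_eq_zero_or_one n with hm | hm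
      · simp [hm]
      · simp [hm]

lemma filter_range_eq_spec (B : Int) : ∀ (n : Nat) (j : Int),
    ((List.range (Nat.size n)).filter (fun t => (n >>> t) % 2 == 1)).map
      (fun t : Nat => B - 2 - (j + t)) = bitsSpec B j n := by
  intro n
  induction n using Nat.strong_induction_on with
  | _ n ih =>
    intro j
    rw [bitsSpec]
    by_cases h0 : n = 0
    · subst h0; simp [Nat.size_zero]
    · rw [if_neg h0, size_succ_div n h0, List.range_succ_eq_map, List.filter_cons,
        List.filter_map]
      have hcomp : ((fun t : Nat => ((n >>> t) % 2 == 1)) ∘ Nat.succ)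
          = (fun t : Nat => (((n / 2) >>> t) % 2 == 1)) := by
        funext t
        have hsh : n >>> (Nat.succ t) = (n / 2) >>> t := by
          rw [Nat.succ_eq_add_one, show t + 1 = 1 + t from by omega,
            Nat.shiftRight_add, Nat.shiftRight_one]
        simp [Function.comp, hsh]
      rw [hcomp]
      have hIH := ih (n / 2) (by omega) (j + 1)
      have hmm : ((fun t : Nat => B - 2 - (j + (t : Int))) ∘ Nat.succ)
          = (fun t : Nat => B - 2 - ((j + 1) + (t : Int))) := by
        funext t; simp [Function.comp]; ring
      rcases Nat.mod_two_eq_zero_or_one n with hm | hm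
      · simp only [Nat.shiftRight_zero, hm]
        rw [if_neg (by decide), List.map_map, hmm, hIH]
        simp
      · simp only [Nat.shiftRight_zero, hm]
        rw [if_pos (by decide), List.map_cons, List.map_map, hmm, hIH]
        simp

lemma cuts_eq (B : Int) (r : Int) (hr : 0 ≤ r) :
    bitsLoopA B r 0 [] =
      ((PySem.List.pyRange 0 (pyBitLength r) 1).filter
        (fun t => (r.toNat >>> t.toNat) % 2 == 1)).map (fun t => B - 2 - t) := by
  have hn : r = ((r.toNat : Nat) : Int) := (Int.toNat_of_nonneg hr).symm
  rw [hn]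
  set n := r.toNat with hdef
  rw [bitsLoopA_eq_spec B n 0 [], ← filter_range_eq_spec B n 0]
  unfold pyBitLength
  rw [PySem.List.pyRange_one]
  simp [List.filter_map, List.map_map, Function.comp_def]

lemma loopA_eq (B M : Int) (n : Nat) (hn : M ≤ 2 ^ n) (hlt : ∀ k : Nat, k < n → (2 : Int) ^ k < M) :
    ∀ (d k : Nat), k + d = n →
      solveLoopA B M (2 ^ k) (k : Int) =
        (if (n : Int) + 2 > B then none else some ((2 : Int) ^ n, (n : Int))) := by
  intro d
  induction d with
  | zero =>
    intro k hk
    have hkn : k = n := by omega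
    subst hkn
    rw [solveLoopA]
    by_cases hB : (k : Int) + 2 > B
    · rw [if_pos hB, if_pos hB]
    · rw [if_neg hB, if_neg hB, if_pos hn]
  | succ d ih =>
    intro k hk
    have hklt : k < n := by omega
    rw [solveLoopA]
    by_cases hB : (k : Int) + 2 > B
    · have hkn : (k : Int) ≤ (n : Int) := by exact_mod_cast Nat.le_of_lt hklt
      rw [if_pos hB, if_pos (by omega : (n : Int) + 2 > B)]
    · have hp : ¬ ((2 : Int) ^ k ≥ M) := not_le.mpr (hlt k hklt)
      rw [if_neg hB, if_neg hp,
        show (2 : Int) ^ k * 2 = 2 ^ (k + 1) from by ring,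
        show (k : Int) + 1 = ((k + 1 : Nat) : Int) from by push_cast; ring,
        ih (k + 1) (by omega)]

lemma main_aux (B M : Int) (n0 : Nat) (hn : M ≤ 2 ^ n0)
    (hlt : ∀ k : Nat, k < n0 → (2 : Int) ^ k < M)
    (hi : (if M > 1 then pyBitLength (M - 1) else 0) = (n0 : Int)) :
    solve B M = solve_alt B M := by
  have hloop := loopA_eq B M n0 hn hlt n0 0 (by omega)
  norm_num at hloop
  unfold solve solve_alt
  rw [hloop, hi]
  by_cases hB : (n0 : Int) + 2 > B
  · rw [if_pos hB, if_pos hB]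
  · rw [if_neg hB, if_neg hB]
    have hr : (0 : Int) ≤ 2 ^ n0 - M := by omega
    simp only [Int.toNat_natCast]
    rw [cuts_eq B ((2 : Int) ^ n0 - M) hr]

-- ===== VERDICT (by name: the statement is the Claim_ definition above) =====
theorem solve_spec : Claim_equal_solve := by
  intro B M _
  unfold Spec_solve
  by_cases hM : M > 1
  · have hM1 : ((M - 1).toNat : Int) = M - 1 := Int.toNat_of_nonneg (by omega)
    set n0 := (M - 1).toNat.size with hn0
    have hn : M ≤ 2 ^ n0 := by
      have h := Nat.lt_size_self (M - 1).toNat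
      have h2 : ((M - 1).toNat : Int) < ((2 ^ n0 : Nat) : Int) := by exact_mod_cast h
      push_cast at h2
      omega
    have hlt : ∀ k : Nat, k < n0 → (2 : Int) ^ k < M := by
      intro k hk
      have h1 : 2 ^ k ≤ (M - 1).toNat := Nat.lt_size.mp hk
      have h2 : ((2 ^ k : Nat) : Int) ≤ ((M - 1).toNat : Int) := by exact_mod_cast h1
      push_cast at h2
      omega
    have hi : (if M > 1 then pyBitLength (M - 1) else 0) = (n0 : Int) := by
      rw [if_pos hM]
      unfold pyBitLength
      have : (M - 1).natAbs = (M - 1).toNat := by omega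
      rw [this]
    exact main_aux B M n0 hn hlt hi
  · have hn : M ≤ 2 ^ (0 : Nat) := by norm_num; omega
    have hlt : ∀ k : Nat, k < 0 → (2 : Int) ^ k < M := by intro k hk; omega
    have hi : (if M > 1 then pyBitLength (M - 1) else 0) = ((0 : Nat) : Int) := by
      rw [if_neg hM]; norm_num
    exact main_aux B M 0 hn hlt hi
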